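-- pv_equiv track=rewrite | github.com/edt-yxz-zzd/python3_src | nn_ns/math_nn/integer/num_radix_digits.py | num_radix_digits
-- ===== SOURCE A (Python) =====
-- from math import floor
--
-- def num_radix_digits_base2(x):
--     assert type(x) is int
--     assert x > 0
--     return x.bit_length()
--
-- def num_radix_digits(x, B):
--     '''x>=1; B>=2; type(B) is int ; B**(n-1) <= x < B**n; return n
--
-- 2 == num_radix_digits(i, 10) for i=10..99
-- n = floor(log x / log B) + 1 >= 1
--
-- [1<=x<B] ==>> n=1
-- [x>=B**m] ==>> B**m <= B**(n-1) <= x < B**n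
--     1 <= B**(n-m-1) <= x//B**m < B**(n-m)
--     n = m + (n-m) = m + num_radix_digits(x//B**m, B)
--
--
-- num_radix_digits(i, 2) = i.bit_length()
-- let L = num_radix_digits(B, 2) >= 2
-- let t = num_radix_digits(x, 2)
-- 2**(L-1) <= B < 2**L
-- 2**(t-1) <= x < 2**t
-- 2**(L-1)**(n-1) <= B**(n-1) <= x < B**n < 2**L**n
-- (L-1)*(n-1) <= t-1 < t <= L*n
-- n >= t/L; n >= ceil(t/L)
-- n-1 <= (t-1)/(L-1); n <= floor((t-1)/(L-1)) + 1
-- ceil(t/L) <= n <= floor((t-1)/(L-1)) + 1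
--
-- floor((t-1)/(L-1)) + 1 - ceil(t/L) <= (t-1)/(L-1) + 1 - (t/L)
--     = ((t-1)L-t(L-1))/(L-1)/L + 1
--     = (t-L)/(L-1)/L + 1
--     < t/(L-1)/L + 1
--
-- let m = ceil(t/L) > 0
--     [x < B**m] ==>> n=m
--     [B**m <= x][m>0] ==>> n = m + num_radix_digits(x//B**m, B)
--     2**(t-1-m*L) < x/B**m < 2**(t-m(L-1)) = 2**(t-ceil(t/L)(L-1))
--         <= 2**(t-t/L *(L-1)) = 2**(t/L)
--     x->x/B**m ==>> t->(t/L) until t<L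
--     no more than floor(log t/log L)+1 steps.
--
--
-- '''
--     x = int(floor(x))
--     b = int(B)
--     assert b == B
--     B = b
--     if not x >= 1:
--         raise ValueError('not x >= 1')
--     if not B >= 2:
--         raise ValueError('not B >= 2')
--
--     if B == 2:
--         return num_radix_digits_base2(x)
--     L = num_radix_digits_base2(B)
--     assert L >= 2
--
--     n = 0
--     while True:
--         assert x >= 1
--         t = num_radix_digits_base2(x)
--         m = (t+L-1)//L
--         n += m
--         B__m = B**m
--         if x < B__m:
--             return n
--         x //= B__m
--     raise logic-error
-- ===== SOURCE B (Python) =====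
-- from math import floor
--
-- def num_radix_digits(x, B):
--     x = int(floor(x))
--     b = int(B)
--     assert b == B
--     B = b
--     if not x >= 1:
--         raise ValueError('not x >= 1')
--     if not B >= 2:
--         raise ValueError('not B >= 2')
--     n = 0
--     while x > 0:
--         x //= B
--         n += 1
--     return n
-- ===== Notes on version B (the rewrite author's own statement) =====
-- stated objective: simpler
-- what changed: Replaced A's doubly-logarithmic block-reduction loop (bit_length-based ceil-division exponent, dividing by B**m each round, plus a special B==2 path) with the classic single loop that divides out one base-B digit per iteration.
import Mathlib
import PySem

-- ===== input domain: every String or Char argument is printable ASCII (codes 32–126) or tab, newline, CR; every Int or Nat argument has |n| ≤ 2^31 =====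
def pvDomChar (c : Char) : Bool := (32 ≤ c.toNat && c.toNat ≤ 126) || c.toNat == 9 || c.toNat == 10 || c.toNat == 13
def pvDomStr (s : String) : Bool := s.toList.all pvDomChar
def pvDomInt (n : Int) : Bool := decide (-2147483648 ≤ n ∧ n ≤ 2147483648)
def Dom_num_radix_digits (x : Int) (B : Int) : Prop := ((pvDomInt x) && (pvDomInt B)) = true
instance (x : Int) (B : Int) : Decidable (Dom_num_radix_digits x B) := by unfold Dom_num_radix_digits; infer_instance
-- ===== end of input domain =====

-- B replaces A's block-reduction loop (bit_length / ceil-division exponent / division by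
-- B**m, plus a B==2 shortcut) by the classic one-digit-per-step repeated-division count;
-- equivalence is proved on x ≥ 1 ∧ B ≥ 2 (elsewhere A raises ValueError).

-- ===== PORT A =====
-- num_radix_digits_base2(x) = x.bit_length() (its assertions hold on every call site under Pre_)
-- A's while-loop; fuel makes it total (x.toNat + 1 steps always suffice under Pre_,
-- since x strictly decreases each iteration; the fuel-0 branch is unreachable there).
def numRadixLoopA (B L : Int) : Nat → Int → Int → Int
  | 0, _, n => n
  | fuel+1, x, n =>
    let t : Int := (PySem.Int.bitLength x : Int)
    let m : Int := PySem.Int.floordiv (t + L - 1) L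
    let n' := n + m
    let Bm := B ^ m.toNat           -- B**m (m ≥ 1 whenever reached under Pre_)
    if x < Bm then n'
    else numRadixLoopA B L fuel (PySem.Int.floordiv x Bm) n'

def num_radix_digits (x : Int) (B : Int) : Int :=
  -- x = int(floor(x)); b = int(B); assert b == B  — identities on int inputs
  if ¬ (x ≥ 1) then 0               -- raise ValueError('not x >= 1'): excluded by Pre_
  else if ¬ (B ≥ 2) then 0          -- raise ValueError('not B >= 2'): excluded by Pre_
  else if B = 2 then (PySem.Int.bitLength x : Int)
  else                              -- L = num_radix_digits_base2(B); assert L >= 2 (holds here)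
    numRadixLoopA B ((PySem.Int.bitLength B : Nat) : Int) (x.toNat + 1) x 0

-- ===== PORT B =====
-- B's while-loop: divide one base-B digit out per iteration (same fuel totalisation).
def numRadixLoopB (B : Int) : Nat → Int → Int → Int
  | 0, _, n => n
  | fuel+1, x, n =>
    if x > 0 then numRadixLoopB B fuel (PySem.Int.floordiv x B) (n + 1) else n

def num_radix_digits_alt (x : Int) (B : Int) : Int :=
  if ¬ (x ≥ 1) then 0               -- raise ValueError('not x >= 1'): excluded by Pre_
  else if ¬ (B ≥ 2) then 0          -- raise ValueError('not B >= 2'): excluded by Pre_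
  else numRadixLoopB B (x.toNat + 1) x 0

-- ===== PRECONDITION & SPEC =====
-- Pre_ excludes exactly the inputs where the Python A raises ValueError (x < 1 or B < 2).
def Pre_num_radix_digits (x : Int) (B : Int) : Prop := 1 ≤ x ∧ 2 ≤ B
instance (x : Int) (B : Int) : Decidable (Pre_num_radix_digits x B) := by unfold Pre_num_radix_digits; infer_instance
def pvWitness_num_radix_digits : Int × Int := (100, 10)

def Spec_num_radix_digits (x : Int) (B : Int) (out : Int) : Prop := out = num_radix_digits_alt x B
instance (x : Int) (B : Int) (out : Int) : Decidable (Spec_num_radix_digits x B out) := by unfold Spec_num_radix_digits; infer_instance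

-- ===== CLAIM (what is proved, stated in full; the proofs are below) =====
def Claim_equal_num_radix_digits : Prop := ∀ (x : Int) (B : Int), Dom_num_radix_digits x B → Pre_num_radix_digits x B → Spec_num_radix_digits x B (num_radix_digits x B)

-- ===== LEMMAS AND PROOFS =====

lemma floordiv_toNat_lt (x B : Int) (hx : 1 ≤ x) (hB : 2 ≤ B) :
    (PySem.Int.floordiv x B).toNat < x.toNat := by
  have h1 : PySem.Int.floordiv x B < x :=
    (PySem.Int.floordiv_lt_iff_lt_mul (by omega)).2 (by nlinarith)
  have h2 : (0:Int) ≤ PySem.Int.floordiv x B :=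
    (PySem.Int.le_floordiv_iff_mul_le (by omega)).2 (by omega)
  omega

-- the mathematical digit count both loops compute
def cnt (B x : Int) : Nat :=
  if h : 1 ≤ x ∧ 2 ≤ B then cnt B (PySem.Int.floordiv x B) + 1 else 0
termination_by x.toNat
decreasing_by exact floordiv_toNat_lt x B h.1 h.2

lemma cnt_pos_step (B x : Int) (hx : 1 ≤ x) (hB : 2 ≤ B) :
    cnt B x = cnt B (PySem.Int.floordiv x B) + 1 := by
  rw [cnt]; simp [hx, hB]

lemma cnt_nonpos (B x : Int) (hx : ¬ 1 ≤ x) : cnt B x = 0 := by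
  rw [cnt]; simp [hx]

lemma cnt_bounds (B : Int) (hB : 2 ≤ B) :
    ∀ (N : Nat) (x : Int), x.toNat ≤ N → 1 ≤ x →
      B ^ (cnt B x - 1) ≤ x ∧ x < B ^ (cnt B x) ∧ 1 ≤ cnt B x := by
  intro N
  induction N with
  | zero => intro x hN hx; exact absurd hN (by omega)
  | succ N ih =>
    intro x hN hx
    have hstep := cnt_pos_step B x hx hB
    set y := PySem.Int.floordiv x B with hy
    have hylt : y.toNat < x.toNat := floordiv_toNat_lt x B hx hB
    have hy0 : (0:Int) ≤ y :=
      (PySem.Int.le_floordiv_iff_mul_le (by omega)).2 (by omega)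
    have hBy : y * B ≤ x := (PySem.Int.le_floordiv_iff_mul_le (by omega)).1 le_rfl
    have hxlt : x < (y + 1) * B :=
      (PySem.Int.floordiv_lt_iff_lt_mul (by omega)).1 (by omega)
    by_cases hy1 : 1 ≤ y
    · obtain ⟨hlo, hhi, hk⟩ := ih y (by omega) hy1
      set k := cnt B y with hkdef
      rw [hstep]
      refine ⟨?_, ?_, by omega⟩
      · have hps : B ^ (k + 1 - 1) = B ^ (k - 1) * B := by
          rw [← pow_succ]; congr 1; omega
        rw [hps]
        calc B ^ (k - 1) * B ≤ y * B := by nlinarith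
          _ ≤ x := hBy
      · have h1 : y + 1 ≤ B ^ k := by omega
        calc x < (y + 1) * B := hxlt
          _ ≤ B ^ k * B := by nlinarith
          _ = B ^ (k + 1) := (pow_succ B k).symm
    · have hyz : y = 0 := by omega
      have hcy : cnt B y = 0 := cnt_nonpos B y (by omega)
      rw [hstep, hcy]
      refine ⟨by simpa using hx, ?_, by omega⟩
      simpa [hyz] using hxlt

lemma cnt_unique (B x : Int) (hB : 2 ≤ B) (hx : 1 ≤ x) (n : Nat) (hn : 1 ≤ n)
    (hlo : B ^ (n - 1) ≤ x) (hhi : x < B ^ n) : cnt B x = n := by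
  obtain ⟨hlo', hhi', hk⟩ := cnt_bounds B hB x.toNat x le_rfl hx
  set k := cnt B x with hkdef
  by_contra hne
  have hB1 : (1:Int) ≤ B := by omega
  rcases lt_or_gt_of_ne hne with h | h
  · have : B ^ k ≤ B ^ (n - 1) := pow_le_pow_right₀ hB1 (by omega)
    omega
  · have : B ^ n ≤ B ^ (k - 1) := pow_le_pow_right₀ hB1 (by omega)
    omega

lemma floordiv_floordiv (x a b : Int) (ha : 0 < a) (hb : 0 < b) :
    PySem.Int.floordiv (PySem.Int.floordiv x a) b = PySem.Int.floordiv x (a * b) := by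
  rw [PySem.Int.floordiv_eq_ediv_of_pos ha, PySem.Int.floordiv_eq_ediv_of_pos hb,
    PySem.Int.floordiv_eq_ediv_of_pos (by positivity)]
  exact Int.ediv_ediv_of_nonneg (by omega)

lemma cnt_div_pow (B x : Int) (hB : 2 ≤ B) :
    ∀ (m : Nat), B ^ m ≤ x → cnt B (PySem.Int.floordiv x (B ^ m)) + m = cnt B x := by
  intro m
  induction m with
  | zero =>
    intro h
    rw [pow_zero, PySem.Int.floordiv_eq_ediv_of_pos (by omega), Int.ediv_one]
    omega
  | succ m ih =>
    intro h
    have hBpos : (0:Int) < B := by omega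
    have hpow : (0:Int) < B ^ m := by positivity
    have hmle : B ^ m ≤ x := by
      have : B ^ m ≤ B ^ (m + 1) := pow_le_pow_right₀ (by omega) (by omega)
      omega
    have hy1 : (1:Int) ≤ PySem.Int.floordiv x (B ^ m) :=
      (PySem.Int.le_floordiv_iff_mul_le hpow).2 (by omega)
    have hstep := cnt_pos_step B (PySem.Int.floordiv x (B ^ m)) hy1 hB
    have hcomp : PySem.Int.floordiv (PySem.Int.floordiv x (B ^ m)) B
        = PySem.Int.floordiv x (B ^ (m + 1)) := by
      rw [floordiv_floordiv x (B ^ m) B hpow hBpos, ← pow_succ]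
    rw [← ih hmle, hstep, hcomp]
    omega

-- bit_length bounds, in Int form, for positive x
lemma bitLength_bounds (x : Int) (hx : 1 ≤ x) :
    (2:Int) ^ (PySem.Int.bitLength x - 1) ≤ x ∧ x < 2 ^ (PySem.Int.bitLength x)
      ∧ 1 ≤ PySem.Int.bitLength x := by
  have habs : (x.natAbs : Int) = x := Int.natAbs_of_nonneg (by omega)
  have hlo := PySem.Int.two_pow_bitLength_le x (by omega)
  have hhi := PySem.Int.lt_two_pow_bitLength x
  have ht : 1 ≤ PySem.Int.bitLength x := by
    by_contra h
    have h0 : PySem.Int.bitLength x = 0 := by omega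
    rw [h0, pow_zero] at hhi
    omega
  refine ⟨?_, ?_, ht⟩
  · calc (2:Int) ^ (PySem.Int.bitLength x - 1)
        = ((2 ^ (PySem.Int.bitLength x - 1) : Nat) : Int) := by push_cast; ring
      _ ≤ (x.natAbs : Int) := by exact_mod_cast hlo
      _ = x := habs
  · calc x = (x.natAbs : Int) := habs.symm
      _ < ((2 ^ (PySem.Int.bitLength x) : Nat) : Int) := by exact_mod_cast hhi
      _ = 2 ^ (PySem.Int.bitLength x) := by push_cast; ring

-- cnt 2 x = bit_length x
lemma cnt_two (x : Int) (hx : 1 ≤ x) : cnt 2 x = PySem.Int.bitLength x := by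
  obtain ⟨hlo, hhi, ht⟩ := bitLength_bounds x hx
  exact cnt_unique 2 x (by omega) hx _ ht hlo hhi

-- B's loop returns n + cnt B x
lemma loopB_eq (B : Int) (hB : 2 ≤ B) :
    ∀ (fuel : Nat) (x n : Int), x.toNat < fuel →
      numRadixLoopB B fuel x n = n + (cnt B x : Int) := by
  intro fuel
  induction fuel with
  | zero => intro x n h; exact absurd h (by omega)
  | succ fuel ih =>
    intro x n h
    by_cases hx : x > 0
    · have hx1 : 1 ≤ x := hx
      rw [numRadixLoopB, if_pos hx,
        ih _ _ (by have := floordiv_toNat_lt x B hx1 hB; omega),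
        cnt_pos_step B x hx1 hB]
      push_cast; ring
    · rw [numRadixLoopB, if_neg hx, cnt_nonpos B x (by omega)]
      simp

-- A's loop returns n + cnt B x (with L = bit_length B)
lemma loopA_eq (B : Int) (hB : 2 ≤ B) :
    ∀ (fuel : Nat) (x n : Int), x.toNat < fuel → 1 ≤ x →
      numRadixLoopA B ((PySem.Int.bitLength B : Nat) : Int) fuel x n = n + (cnt B x : Int) := by
  intro fuel
  induction fuel with
  | zero => intro x n h hx; exact absurd h (by omega)
  | succ fuel ih =>
    intro x n hfuel hx
    obtain ⟨hxlo, hxhi, ht1⟩ := bitLength_bounds x hx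
    obtain ⟨hBlo, hBhi, hL1⟩ := bitLength_bounds B (by omega)
    set tN := PySem.Int.bitLength x with htN
    set LN := PySem.Int.bitLength B with hLN
    have hL2 : 2 ≤ LN := by
      by_contra hcon
      have h1 : LN = 1 := by omega
      rw [h1, pow_one] at hBhi
      omega
    have htpos : (1:Int) ≤ (tN:Int) := by exact_mod_cast ht1
    have hLI : (2:Int) ≤ (LN:Int) := by exact_mod_cast hL2
    have hmbr := (PySem.Int.floordiv_eq_iff_of_pos
      (a := (tN:Int) + (LN:Int) - 1) (b := (LN:Int))
      (q := PySem.Int.floordiv ((tN:Int) + (LN:Int) - 1) (LN:Int)) (by omega)).1 rfl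
    set m : Int := PySem.Int.floordiv ((tN:Int) + (LN:Int) - 1) (LN:Int) with hm
    have hmul : (m + 1) * (LN:Int) = m * (LN:Int) + (LN:Int) := by ring
    have h2 := hmbr.2
    rw [hmul] at h2
    have hm1 : 1 ≤ m := by
      by_cases hc : 1 ≤ m
      · exact hc
      · exfalso
        have hc0 : m ≤ 0 := by omega
        nlinarith [hmbr.1, h2]
    set mN := m.toNat with hmN
    have hmN1 : 1 ≤ mN := by omega
    have hmcast : (mN : Int) = m := by omega
    -- the two bracket facts, moved to Nat
    have hPc : ((LN * mN : Nat) : Int) = m * (LN:Int) := by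
      push_cast
      rw [hmcast]; ring
    have hQc : ((LN * (mN - 1) : Nat) : Int) = m * (LN:Int) - (LN:Int) := by
      push_cast [Nat.cast_sub (show 1 ≤ mN by omega)]
      rw [hmcast]; ring
    have htLm : tN ≤ LN * mN := by omega
    have hexp : LN * (mN - 1) ≤ tN - 1 := by
      have h3 := hmbr.1
      omega
    -- B ^ (mN - 1) ≤ x
    have hlow : B ^ (mN - 1) ≤ x := by
      rcases Nat.eq_or_lt_of_le hmN1 with h1 | h1
      · rw [← h1]; simpa using hx
      · have hBpow : B ^ (mN - 1) < ((2:Int) ^ LN) ^ (mN - 1) :=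
          pow_lt_pow_left₀ hBhi (by omega) (by omega)
        calc B ^ (mN - 1) ≤ ((2:Int) ^ LN) ^ (mN - 1) := le_of_lt hBpow
          _ = (2:Int) ^ (LN * (mN - 1)) := by rw [← pow_mul]
          _ ≤ (2:Int) ^ (tN - 1) := pow_le_pow_right₀ (by omega) hexp
          _ ≤ x := hxlo
    have hBmpos : (0:Int) < B ^ mN := by positivity
    simp only [numRadixLoopA]
    rw [← hm, ← hmN]
    by_cases hcase : x < B ^ mN
    · rw [if_pos hcase, cnt_unique B x hB hx mN hmN1 hlow hcase, hmcast]
    · rw [if_neg hcase]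
      have hge : B ^ mN ≤ x := by omega
      have hy1 : (1:Int) ≤ PySem.Int.floordiv x (B ^ mN) :=
        (PySem.Int.le_floordiv_iff_mul_le hBmpos).2 (by omega)
      have hyd : (PySem.Int.floordiv x (B ^ mN)).toNat < x.toNat := by
        have hBm2 : (2:Int) ≤ B ^ mN := by
          calc (2:Int) ≤ B := hB
            _ = B ^ 1 := (pow_one B).symm
            _ ≤ B ^ mN := pow_le_pow_right₀ (by omega) (by omega)
        exact floordiv_toNat_lt x (B ^ mN) hx hBm2
      rw [ih _ _ (by omega) hy1]
      have hc := cnt_div_pow B x hB mN hge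
      omega

-- ===== VERDICT (by name: the statement is the Claim_ definition above) =====
theorem num_radix_digits_spec : Claim_equal_num_radix_digits := by
  intro x B _ hpre
  obtain ⟨hx, hB⟩ := hpre
  unfold Spec_num_radix_digits num_radix_digits num_radix_digits_alt
  have g1 : ¬¬(x ≥ 1) := by omega
  have g2 : ¬¬(B ≥ 2) := by omega
  rw [if_neg g1, if_neg g2, if_neg g1, if_neg g2]
  have hxfuel : x.toNat < x.toNat + 1 := Nat.lt_succ_self _
  rw [loopB_eq B hB _ x 0 hxfuel]
  by_cases h2 : B = 2
  · rw [if_pos h2, h2, cnt_two x hx]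
    simp
  · rw [if_neg h2, loopA_eq B hB _ x 0 hxfuel hx]
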